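-- pv_equiv track=rewrite | github.com/hyukkyukang/raquel_anon | src/utils/table_data.py | estimate_column_statistics_from_rows
-- ===== SOURCE A (Python) =====
-- from typing import Any, Dict, List, Optional, Tuple
--
-- def estimate_column_statistics_from_rows(
--     table_data: Dict[str, List[Dict[str, Any]]],
-- ) -> Dict[str, Dict[str, int]]:
--     """Estimate non-null counts directly from already-fetched sample rows."""
--     result: Dict[str, Dict[str, int]] = {}
--
--     for table_name, rows in table_data.items():
--         stats: Dict[str, int] = {}
--         columns = {column for row in rows for column in row.keys()}
--         for column in columns:
--             stats[column] = sum(1 for row in rows if row.get(column) is not None)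
--         result[table_name] = stats
--
--     return result
-- ===== SOURCE B (Python) =====
-- def _count_non_nulls(rows):
--     """One pass over the cells: register each column, count the non-null values."""
--     stats = {}
--     for row in rows:
--         for column, value in row.items():
--             if column not in stats:
--                 stats[column] = 0
--             if value is not None:
--                 stats[column] += 1
--     return stats
--
--
-- def estimate_column_statistics_from_rows(table_data):
--     """Single pass per table over each row's cells; no column set, no per-column rescan."""
--     return {table_name: _count_non_nulls(rows) for table_name, rows in table_data.items()}
-- ===== Notes on version B (the rewrite author's own statement) =====
-- stated objective: faster
-- what changed: Replaces A's per-table 'build the set of all columns, then rescan every row once per column' double loop with a helper doing a single pass over each row's cells (register the column, count non-null values) and a top-level dict comprehension.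
import Mathlib
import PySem

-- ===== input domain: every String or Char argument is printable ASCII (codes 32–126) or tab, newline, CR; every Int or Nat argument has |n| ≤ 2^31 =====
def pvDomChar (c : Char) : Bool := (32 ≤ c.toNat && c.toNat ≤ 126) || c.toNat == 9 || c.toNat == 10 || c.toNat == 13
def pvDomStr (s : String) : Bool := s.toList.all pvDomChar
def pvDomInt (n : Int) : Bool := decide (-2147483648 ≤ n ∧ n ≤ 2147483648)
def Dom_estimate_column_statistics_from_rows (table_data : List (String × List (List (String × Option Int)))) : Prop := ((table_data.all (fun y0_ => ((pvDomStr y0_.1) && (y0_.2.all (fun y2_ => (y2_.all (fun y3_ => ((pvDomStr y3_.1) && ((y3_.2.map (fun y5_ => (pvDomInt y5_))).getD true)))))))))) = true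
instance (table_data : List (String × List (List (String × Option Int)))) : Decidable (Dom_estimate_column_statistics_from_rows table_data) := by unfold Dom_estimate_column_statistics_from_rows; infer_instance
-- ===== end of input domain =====

-- B replaces A's per-table "collect the set of columns, then rescan all rows for each
-- column" double loop by a single pass over each row's cells that registers the column
-- and counts its non-null values (objective: faster on wide/sparse tables).
-- Python set iteration order is not modelled; ports use first-insertion order, and the
-- dict outputs are compared ignoring order per the type convention.


-- ===== PORT A =====
def estimate_column_statistics_from_rows (table_data : List (String × List (List (String × Option Int)))) : List (String × List (String × Int)) :=
  let td := PySem.Dict.ofList table_data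
  let result := td.items.foldl (fun result tr =>
      let rows := tr.2.map (fun row => PySem.Dict.ofList row)
      -- columns = {column for row in rows for column in row.keys()}
      let columns := PySem.Set.ofList (rows.flatMap (fun r => r.keys))
      -- for column in columns: stats[column] = sum(1 for row in rows if row.get(column) is not None)
      let stats := columns.foldl (fun s c =>
          s.insert c (rows.foldl (fun acc r =>
              if ((r.get? c).getD none).isSome then acc + 1 else acc) (0 : Int)))
        PySem.Dict.empty
      result.insert tr.1 stats.items)
    PySem.Dict.empty
  result.items

-- ===== PORT B =====
-- helper _count_non_nulls: one pass over the cells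
def pvCountNonNulls (rows : List (List (String × Option Int))) : PySem.Dict String Int :=
  rows.foldl (fun stats row =>
      (PySem.Dict.ofList row).items.foldl (fun stats cv =>
          -- if column not in stats: stats[column] = 0
          let stats := if stats.contains cv.1 then stats else stats.insert cv.1 0
          -- if value is not None: stats[column] += 1
          if cv.2.isSome then stats.insert cv.1 (stats.getD cv.1 0 + 1) else stats)
        stats)
    PySem.Dict.empty

def estimate_column_statistics_from_rows_alt (table_data : List (String × List (List (String × Option Int)))) : List (String × List (String × Int)) :=
  (PySem.Dict.ofList table_data).items.map (fun tr => (tr.1, (pvCountNonNulls tr.2).items))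

-- ===== PRECONDITION & SPEC =====
def Spec_estimate_column_statistics_from_rows (table_data : List (String × List (List (String × Option Int)))) (out : List (String × List (String × Int))) : Prop := out = estimate_column_statistics_from_rows_alt table_data
instance (table_data : List (String × List (List (String × Option Int)))) (out : List (String × List (String × Int))) : Decidable (Spec_estimate_column_statistics_from_rows table_data out) := by unfold Spec_estimate_column_statistics_from_rows; infer_instance

-- ===== CLAIM (what is proved, stated in full; the proofs are below) =====
def Claim_equal_estimate_column_statistics_from_rows : Prop := ∀ (table_data : List (String × List (List (String × Option Int)))), Dom_estimate_column_statistics_from_rows table_data → Spec_estimate_column_statistics_from_rows table_data (estimate_column_statistics_from_rows table_data)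

-- ===== LEMMAS AND PROOFS =====

-- the per-cell step of B's inner loop
def pvStep (stats : PySem.Dict String Int) (cv : String × Option Int) : PySem.Dict String Int :=
  let stats := if stats.contains cv.1 then stats else stats.insert cv.1 0
  if cv.2.isSome then stats.insert cv.1 (stats.getD cv.1 0 + 1) else stats

theorem pvStep_getD (s : PySem.Dict String Int) (cv : String × Option Int) (c : String) :
    (pvStep s cv).getD c 0 = s.getD c 0 + (if cv.1 = c ∧ cv.2.isSome then 1 else 0) := by
  unfold pvStep
  by_cases hk : cv.1 = c
  · subst hk
    by_cases hc : s.contains cv.1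
    · simp only [hc, ite_true]
      cases hs : cv.2.isSome <;> simp [PySem.Dict.getD_insert_self, hs]
    · simp only [hc, Bool.false_eq_true, ite_false]
      have h0 : s.getD cv.1 0 = 0 := PySem.Dict.getD_of_not_contains _ _ (by simpa using hc)
      cases hs : cv.2.isSome <;>
        simp [PySem.Dict.getD_insert_self, hs, h0]
  · have hne : c ≠ cv.1 := fun he => hk he.symm
    by_cases hc : s.contains cv.1 <;>
      cases hs : cv.2.isSome <;>
        simp [hc, hs, PySem.Dict.getD_insert_of_ne _ _ _ hne, hk]

theorem pvStep_keys (s : PySem.Dict String Int) (cv : String × Option Int) :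
    (pvStep s cv).keys = PySem.Set.add s.keys cv.1 := by
  unfold pvStep
  by_cases hc : s.contains cv.1
  · have hmem : cv.1 ∈ s.keys := (PySem.Dict.contains_iff_mem_keys s cv.1).1 hc
    cases hs : cv.2.isSome <;>
      simp [hc, hs, PySem.Dict.keys_insert_of_contains s _ hc, PySem.Set.add_of_mem hmem]
  · have hnmem : cv.1 ∉ s.keys := fun hm => hc ((PySem.Dict.contains_iff_mem_keys s cv.1).2 hm)
    have hk1 : (s.insert cv.1 0).keys = s.keys ++ [cv.1] :=
      PySem.Dict.keys_insert_of_not_contains s _ (by simpa using hc)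
    cases hs : cv.2.isSome
    · simp [hc, hs, hk1, PySem.Set.add_of_not_mem hnmem]
    · have hc1 : (s.insert cv.1 0).contains cv.1 := PySem.Dict.contains_insert_self _ _ _
      simp [hc, hs, PySem.Dict.keys_insert_of_contains (s.insert cv.1 0) _ hc1, hk1,
        PySem.Set.add_of_not_mem hnmem]

-- B's counter after the cells of one row
theorem getD_cells (cells : List (String × Option Int)) (s : PySem.Dict String Int) (c : String) :
    (cells.foldl pvStep s).getD c 0
      = s.getD c 0 + ((cells.filter (fun cv => cv.1 == c)).countP (fun cv => cv.2.isSome) : Int) := by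
  induction cells generalizing s with
  | nil => simp
  | cons hd tl ih =>
    rw [List.foldl_cons, ih, pvStep_getD]
    by_cases hk : hd.1 = c
    · simp only [List.filter_cons, hk, beq_self_eq_true, ite_true, List.countP_cons]
      cases hs : hd.2.isSome <;> simp [hk, hs] <;> push_cast <;> ring
    · have hb : (hd.1 == c) = false := by simp [hk]
      simp [List.filter_cons, hb, hk]

theorem keys_cells (cells : List (String × Option Int)) (s : PySem.Dict String Int) :
    (cells.foldl pvStep s).keys = PySem.Set.update s.keys (cells.map (·.1)) := by
  induction cells generalizing s with
  | nil => simp [PySem.Set.update]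
  | cons hd tl ih =>
    rw [List.foldl_cons, ih, pvStep_keys, List.map_cons, PySem.Set.update_cons]

-- counting the non-null hit of a single column in one row's cell list (keys distinct)
theorem cnt_single (l : List (String × Option Int)) (h : (l.map (·.1)).Nodup) (c : String) :
    ((l.filter (fun cv => cv.1 == c)).countP (fun cv => cv.2.isSome))
      = (if (((PySem.Dict.mk l).get? c).getD none).isSome then 1 else 0) := by
  induction l with
  | nil => simp [PySem.Dict.get?]
  | cons hd tl ih =>
    simp only [List.map_cons, List.nodup_cons] at h
    rw [PySem.Dict.get?_mk_cons]
    by_cases hk : hd.1 = c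
    · have hb : (hd.1 == c) = true := by simp [hk]
      have hnil : tl.filter (fun cv => cv.1 == c) = [] := by
        rw [List.filter_eq_nil_iff]
        intro cv hcv
        simp only [beq_iff_eq]
        intro hbe
        exact h.1 ((hk.trans hbe.symm) ▸ List.mem_map_of_mem hcv)
      simp only [List.filter_cons, hb, ite_true, hnil, List.countP_cons, List.countP_nil]
      cases hd.2 <;> simp
    · have hb : (hd.1 == c) = false := by simp [hk]
      simp only [List.filter_cons, hb, Bool.false_eq_true, ite_false]
      exact ih h.2

-- B's counter after all rows of a table
theorem getD_rows (rows : List (List (String × Option Int))) (s : PySem.Dict String Int) (c : String) :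
    (rows.foldl (fun stats row => (PySem.Dict.ofList row).items.foldl pvStep stats) s).getD c 0
      = s.getD c 0 + (((rows.map (fun row => PySem.Dict.ofList row)).countP
            (fun r => ((r.get? c).getD none).isSome)) : Int) := by
  induction rows generalizing s with
  | nil => simp
  | cons hd tl ih =>
    rw [List.foldl_cons, ih, getD_cells]
    have hnd : ((PySem.Dict.ofList hd).items.map (·.1)).Nodup := PySem.Dict.nodup_keys_ofList hd
    have h1 := cnt_single (PySem.Dict.ofList hd).items hnd c
    have hmk : PySem.Dict.mk (PySem.Dict.ofList hd).items = PySem.Dict.ofList hd := rfl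
    rw [hmk] at h1
    simp only [List.map_cons, List.countP_cons, h1]
    by_cases hs : (((PySem.Dict.ofList hd).get? c).getD none).isSome = true <;>
      simp [hs] <;> push_cast <;> ring

theorem keys_rows (rows : List (List (String × Option Int))) (s : PySem.Dict String Int) :
    (rows.foldl (fun stats row => (PySem.Dict.ofList row).items.foldl pvStep stats) s).keys
      = PySem.Set.update s.keys ((rows.map (fun row => PySem.Dict.ofList row)).flatMap (fun r => r.keys)) := by
  induction rows generalizing s with
  | nil => simp [PySem.Set.update]
  | cons hd tl ih =>
    rw [List.foldl_cons, ih, keys_cells]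
    simp [PySem.Set.update, List.foldl_append, PySem.Dict.keys]

-- the per-table stats agree as item lists
theorem stats_eq (rws : List (List (String × Option Int))) :
    (let rows := rws.map (fun row => PySem.Dict.ofList row)
     let columns := PySem.Set.ofList (rows.flatMap (fun r => r.keys))
     (columns.foldl (fun s c =>
        s.insert c (rows.foldl (fun acc r =>
            if ((r.get? c).getD none).isSome then acc + 1 else acc) (0 : Int)))
       PySem.Dict.empty).items)
    = (pvCountNonNulls rws).items := by
  set rows := rws.map (fun row => PySem.Dict.ofList row) with hrows
  set columns := PySem.Set.ofList (rows.flatMap (fun r => r.keys)) with hcols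
  -- A side: fresh distinct inserts over empty
  have hA : (columns.foldl (fun s c =>
        s.insert c (rows.foldl (fun acc r =>
            if ((r.get? c).getD none).isSome then acc + 1 else acc) (0 : Int)))
       PySem.Dict.empty).items
      = columns.map (fun c => (c, rows.foldl (fun acc r =>
            if ((r.get? c).getD none).isSome then acc + 1 else acc) (0 : Int))) := by
    have := PySem.Dict.items_foldl_insert_fresh
      (l := columns) (k := fun c => c)
      (v := fun c => rows.foldl (fun acc r =>
            if ((r.get? c).getD none).isSome then acc + 1 else acc) (0 : Int))
      (d := PySem.Dict.empty)
      (by intro a _; simp) (by simpa using PySem.Set.nodup_ofList _)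
    simpa using this
  -- B side: items via keys and getD
  have hBdef : pvCountNonNulls rws
      = rws.foldl (fun stats row => (PySem.Dict.ofList row).items.foldl pvStep stats)
          PySem.Dict.empty := rfl
  have hkeys : (pvCountNonNulls rws).keys = columns := by
    rw [hBdef, keys_rows]
    simp only [PySem.Set.update, PySem.Set.ofList_eq_foldl, PySem.Dict.keys_empty, hcols]
    rw [hrows]
  have hnd : (pvCountNonNulls rws).keys.Nodup := by
    rw [hkeys]; exact PySem.Set.nodup_ofList _
  have hitems : (pvCountNonNulls rws).items
      = (pvCountNonNulls rws).keys.map (fun k => (k, (pvCountNonNulls rws).getD k 0)) :=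
    PySem.Dict.items_eq_map_keys (pvCountNonNulls rws) hnd 0
  rw [hA, hitems, hkeys]
  apply List.map_congr_left
  intro c _
  have hbd : (pvCountNonNulls rws).getD c 0
      = (0 : Int) + ((rows.countP (fun r => ((r.get? c).getD none).isSome)) : Int) := by
    rw [hBdef, getD_rows]; simp [hrows]
  rw [hbd, PySem.List.foldl_if_add_one]

-- ===== VERDICT (by name: the statement is the Claim_ definition above) =====
theorem estimate_column_statistics_from_rows_spec : Claim_equal_estimate_column_statistics_from_rows := by
  intro table_data _
  unfold Spec_estimate_column_statistics_from_rows
  simp only [estimate_column_statistics_from_rows, estimate_column_statistics_from_rows_alt]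
  set td := PySem.Dict.ofList table_data with htd
  have hfresh : ∀ a ∈ td.items, (PySem.Dict.empty : PySem.Dict String (List (String × Int))).contains a.1 = false := by
    intro a _; simp
  have hnd : (td.items.map (fun tr => tr.1)).Nodup := by
    have := PySem.Dict.nodup_keys_ofList table_data
    simpa [PySem.Dict.keys] using this
  have htop := PySem.Dict.items_foldl_insert_fresh
    (l := td.items) (k := fun tr => tr.1)
    (v := fun tr =>
      ((PySem.Set.ofList ((tr.2.map (fun row => PySem.Dict.ofList row)).flatMap (fun r => r.keys))).foldl
          (fun s c =>
            s.insert c ((tr.2.map (fun row => PySem.Dict.ofList row)).foldl (fun acc r =>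
                if ((r.get? c).getD none).isSome then acc + 1 else acc) (0 : Int)))
        PySem.Dict.empty).items)
    (d := PySem.Dict.empty) hfresh hnd
  rw [htop]
  have hemp : (PySem.Dict.empty : PySem.Dict String (List (String × Int))).items = [] := rfl
  rw [hemp, List.nil_append]
  apply List.map_congr_left
  intro tr _
  exact congrArg _ (stats_eq tr.2)
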